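-- pv_equiv track=rewrite | github.com/loveDjjj/OptoGPT-GRPO | runners/run_tsne_compare.py | _build_material_token_indices
-- ===== SOURCE A (Python) =====
-- NOTEBOOK_MATERIALS = [
--     "Al",
--     "Ag",
--     "Al2O3",
--     "AlN",
--     "Ge",
--     "HfO2",
--     "ITO",
--     "MgF2",
--     "MgO",
--     "Si",
--     "Si3N4",
--     "SiO2",
--     "Ta2O5",
--     "TiN",
--     "TiO2",
--     "ZnO",
--     "ZnS",
--     "ZnSe",
-- ]
--
-- def _build_material_token_indices(struc_word_dict: dict[str, int]) -> dict[str, list[int]]: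
--     """构造 notebook 里 `mat_index` 等价映射。"""
--
--     material_indices: dict[str, list[int]] = {}
--     for material in NOTEBOOK_MATERIALS:
--         token_ids = []
--         for thickness in range(10, 501, 10):
--             token = f"{material}_{thickness}"
--             token_id = struc_word_dict.get(token)
--             if token_id is not None:
--                 token_ids.append(int(token_id))
--         material_indices[material] = token_ids
--     return material_indices
-- ===== SOURCE B (Python) =====
-- NOTEBOOK_MATERIALS = [
--     "Al",
--     "Ag",
--     "Al2O3",
--     "AlN",
--     "Ge",
--     "HfO2",
--     "ITO",
--     "MgF2",
--     "MgO",
--     "Si",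
--     "Si3N4",
--     "SiO2",
--     "Ta2O5",
--     "TiN",
--     "TiO2",
--     "ZnO",
--     "ZnS",
--     "ZnSe",
-- ]
--
-- _MATERIAL_SET = set(NOTEBOOK_MATERIALS)
--
--
-- def _parse_token(token):
--     """Return (material, thickness) if token is '<material>_<thickness>' with a
--     known material and a canonical thickness on the 10..500 step-10 grid."""
--     i = token.find("_")
--     if i < 0:
--         return None
--     name, suffix = token[:i], token[i + 1:]
--     if name not in _MATERIAL_SET:
--         return None
--     try:
--         t = int(suffix)
--     except ValueError:
--         return None
--     if t < 10 or t > 500 or t % 10 != 0 or suffix != str(t):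
--         return None
--     return name, t
--
--
-- def _build_material_token_indices(struc_word_dict: dict[str, int]) -> dict[str, list[int]]:
--     buckets = {m: [] for m in NOTEBOOK_MATERIALS}
--     for token, token_id in struc_word_dict.items():
--         parsed = _parse_token(token)
--         if parsed is not None:
--             name, t = parsed
--             buckets[name].append((t, int(token_id)))
--     return {m: [tid for _, tid in sorted(pts, key=lambda p: p[0])]
--             for m, pts in buckets.items()}
-- ===== Notes on version B (the rewrite author's own statement) =====
-- stated objective: alternative
-- what changed: B makes a single pass over the dict, parsing each token into (material, thickness) and bucketing it, then sorts each material's bucket by thickness, instead of A's 900 generated-key lookups (18 materials x 50 thicknesses).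
import Mathlib
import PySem

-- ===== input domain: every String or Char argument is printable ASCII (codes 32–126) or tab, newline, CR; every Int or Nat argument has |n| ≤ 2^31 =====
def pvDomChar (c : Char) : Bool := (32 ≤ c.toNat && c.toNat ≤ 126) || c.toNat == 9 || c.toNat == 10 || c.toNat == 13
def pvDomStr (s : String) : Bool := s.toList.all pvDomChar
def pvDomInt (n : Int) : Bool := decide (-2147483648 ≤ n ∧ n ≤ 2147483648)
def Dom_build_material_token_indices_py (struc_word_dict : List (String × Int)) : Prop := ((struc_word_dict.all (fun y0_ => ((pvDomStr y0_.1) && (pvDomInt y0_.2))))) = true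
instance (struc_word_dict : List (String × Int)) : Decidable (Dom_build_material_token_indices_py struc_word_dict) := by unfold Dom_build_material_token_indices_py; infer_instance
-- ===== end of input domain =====

-- B re-implements the map by one parsing scan of the dict plus per-material sorts,
-- instead of A's 900 generated-key lookups; equivalence is over the returned value.

-- shared module constant NOTEBOOK_MATERIALS
def pvMats : List String :=
  ["Al", "Ag", "Al2O3", "AlN", "Ge", "HfO2", "ITO", "MgF2", "MgO", "Si",
   "Si3N4", "SiO2", "Ta2O5", "TiN", "TiO2", "ZnO", "ZnS", "ZnSe"]

-- range(10, 501, 10), the thickness grid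
def pvGrid : List Int := PySem.List.pyRange 10 501 10

-- ===== PORT A =====
-- A-side helper: the body of A's inner loop
-- token = f"{material}_{thickness}"; token_id = struc_word_dict.get(token);
-- if token_id is not None: token_ids.append(int(token_id))  (int() is the identity on Int)
def pvAStep (struc_word_dict : List (String × Int)) (material : String)
    (token_ids : List Int) (thickness : Int) : List Int :=
  match (PySem.Dict.mk struc_word_dict).get? (material ++ "_" ++ PySem.Int.toStr thickness) with
  | some token_id => token_ids ++ [token_id]
  | none => token_ids

def build_material_token_indices_py (struc_word_dict : List (String × Int)) : List (String × List Int) :=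
  (pvMats.foldl (fun material_indices material =>
      material_indices.insert material
        (pvGrid.foldl (pvAStep struc_word_dict material) []))
    PySem.Dict.empty).items

-- ===== PORT B =====
-- B-side helper: _MATERIAL_SET = set(NOTEBOOK_MATERIALS)
def pvMatSet : PySem.Set String := PySem.Set.ofList pvMats

-- B-side helper: _parse_token
def pvParseToken (token : String) : Option (String × Int) :=
  let i := PySem.Str.find token "_"
  if i < 0 then none
  else
    let name := PySem.Str.slice token none (some i)
    let suffix := PySem.Str.slice token (some (i + 1)) none
    if PySem.Set.contains pvMatSet name then
      match PySem.Int.ofStr? suffix with   -- try: int(suffix) / except ValueError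
      | some t =>
          if 10 ≤ t ∧ t ≤ 500 ∧ PySem.Int.mod t 10 = 0 ∧ suffix = PySem.Int.toStr t then
            some (name, t)
          else none
      | none => none
    else none

-- B-side helper: buckets = {m: [] for m in NOTEBOOK_MATERIALS}
def pvBuckets0 : PySem.Dict String (List (Int × Int)) :=
  pvMats.foldl (fun b m => b.insert m []) PySem.Dict.empty

-- B-side helper: the scan loop over struc_word_dict.items()
def pvScan (struc_word_dict : List (String × Int)) : PySem.Dict String (List (Int × Int)) :=
  struc_word_dict.foldl (fun bk p =>
    match pvParseToken p.1 with
    | some nt => bk.modify nt.1 [] (· ++ [(nt.2, p.2)])   -- buckets[name].append((t, int(token_id)))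
    | none => bk) pvBuckets0

def build_material_token_indices_py_alt (struc_word_dict : List (String × Int)) : List (String × List Int) :=
  ((pvScan struc_word_dict).items.foldl (fun out mp =>
      out.insert mp.1 ((PySem.List.sorted mp.2 (·.1) false).map (·.2)))
    PySem.Dict.empty).items

-- ===== PRECONDITION & SPEC =====
-- Pre_ excludes association lists with duplicate keys: a Python dict cannot contain
-- them, so such lists do not represent any input of A (on them the two association-list
-- models diverge only as an artefact of the encoding).
def Pre_build_material_token_indices_py (struc_word_dict : List (String × Int)) : Prop :=
  (struc_word_dict.map (·.1)).Nodup
instance (struc_word_dict : List (String × Int)) : Decidable (Pre_build_material_token_indices_py struc_word_dict) := by unfold Pre_build_material_token_indices_py; infer_instance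

def pvWitness_build_material_token_indices_py : (List (String × Int)) :=
  [("Al_10", 7), ("Al_30", 2), ("SiO2_500", 5), ("hello", 1)]

def Spec_build_material_token_indices_py (struc_word_dict : List (String × Int)) (out : List (String × List Int)) : Prop := out = build_material_token_indices_py_alt struc_word_dict
instance (struc_word_dict : List (String × Int)) (out : List (String × List Int)) : Decidable (Spec_build_material_token_indices_py struc_word_dict out) := by unfold Spec_build_material_token_indices_py; infer_instance

-- ===== CLAIM (what is proved, stated in full; the proofs are below) =====
def Claim_equal_build_material_token_indices_py : Prop := ∀ (struc_word_dict : List (String × Int)), Dom_build_material_token_indices_py struc_word_dict → Pre_build_material_token_indices_py struc_word_dict → Spec_build_material_token_indices_py struc_word_dict (build_material_token_indices_py struc_word_dict)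

-- ===== LEMMAS AND PROOFS =====

-- the token string A builds for material m and thickness t
def pvKey (m : String) (t : Int) : String := m ++ "_" ++ PySem.Int.toStr t

-- the parse step applied to a dict entry
def pvParse (p : String × Int) : Option (String × (Int × Int)) :=
  (pvParseToken p.1).map (fun nt => (nt.1, (nt.2, p.2)))

-- B's bucket for material m
def pvBucket (d : List (String × Int)) (m : String) : List (Int × Int) :=
  (((d.filterMap pvParse).filter (·.1 == m)).map (·.2))

-- the (thickness, id) pairs in grid order, as A finds them
def pvYs (d : List (String × Int)) (m : String) : List (Int × Int) :=
  pvGrid.filterMap (fun t => ((PySem.Dict.mk d).get? (pvKey m t)).map (fun v => (t, v)))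

set_option maxHeartbeats 4000000 in
theorem pvParseToken_key : ∀ m ∈ pvMats, ∀ t ∈ pvGrid, pvParseToken (pvKey m t) = some (m, t) := by
  decide

-- pvParseToken with its local lets expanded
theorem pvParseToken_def (k : String) :
    pvParseToken k =
      (if PySem.Str.find k "_" < 0 then none
       else if PySem.Set.contains pvMatSet (PySem.Str.slice k none (some (PySem.Str.find k "_"))) then
         match PySem.Int.ofStr? (PySem.Str.slice k (some (PySem.Str.find k "_" + 1)) none) with
         | some t =>
             if 10 ≤ t ∧ t ≤ 500 ∧ PySem.Int.mod t 10 = 0 ∧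
                 PySem.Str.slice k (some (PySem.Str.find k "_" + 1)) none = PySem.Int.toStr t then
               some (PySem.Str.slice k none (some (PySem.Str.find k "_")), t)
             else none
         | none => none
       else none) := rfl

set_option maxHeartbeats 2000000 in
theorem pvParseToken_sound (k : String) (m : String) (t : Int)
    (h : pvParseToken k = some (m, t)) : m ∈ pvMats ∧ t ∈ pvGrid ∧ k = pvKey m t := by
  rw [pvParseToken_def] at h
  by_cases hlt : PySem.Str.find k "_" < 0
  · rw [if_pos hlt] at h; exact absurd h (by simp)
  rw [if_neg hlt] at h
  by_cases hmem : PySem.Set.contains pvMatSet (PySem.Str.slice k none (some (PySem.Str.find k "_"))) = true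
  · rw [if_pos hmem] at h
    cases hof : PySem.Int.ofStr? (PySem.Str.slice k (some (PySem.Str.find k "_" + 1)) none) with
    | none => rw [hof] at h; dsimp only at h; exact absurd h (by simp)
    | some t' =>
      rw [hof] at h
      dsimp only at h
      by_cases hc : 10 ≤ t' ∧ t' ≤ 500 ∧ PySem.Int.mod t' 10 = 0 ∧
          PySem.Str.slice k (some (PySem.Str.find k "_" + 1)) none = PySem.Int.toStr t'
      · rw [if_pos hc] at h
        have hpair := Option.some.inj h
        have hname : PySem.Str.slice k none (some (PySem.Str.find k "_")) = m := congrArg Prod.fst hpair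
        have ht' : t' = t := congrArg Prod.snd hpair
        subst ht'
        have hmm : m ∈ pvMats := by
          rw [← hname]
          have h2 := hmem
          simp only [pvMatSet, PySem.Set.contains] at h2
          simpa [PySem.Set.mem_ofList] using h2
        refine ⟨hmm, ?_, ?_⟩
        · rw [pvGrid, PySem.List.mem_pyRange_iff_of_pos (by norm_num)]
          have hdvd : (10 : Int) ∣ t' := (PySem.Int.mod_eq_zero_iff_dvd t' 10).mp hc.2.2.1
          exact ⟨hc.1, by omega, by omega⟩
        · have h0 : (0 : Int) ≤ PySem.Str.find k "_" := by omega
          set i : Int := PySem.Str.find k "_" with hi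
          have hfc : PySem.Chars.find k.toList ['_'] = i := by rw [hi]; rfl
          have hspec := PySem.Chars.find_spec (s := k.toList) (sub := ['_']) (by rw [hfc]; exact h0)
          rw [hfc] at hspec
          obtain ⟨tl, htl⟩ := hspec.1
          have hname_toList : (PySem.Str.slice k none (some i)).toList = k.toList.take i.toNat := by
            rw [PySem.Str.toList_slice, PySem.Chars.slice_eq_listSlice, PySem.List.slice_to _ h0]
          have hsuf_toList : (PySem.Str.slice k (some (i + 1)) none).toList = k.toList.drop (i.toNat + 1) := by
            rw [PySem.Str.toList_slice, PySem.Chars.slice_eq_listSlice, PySem.List.slice_from _ (by omega),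
              show (i + 1).toNat = i.toNat + 1 from by omega]
          have hdrop : k.toList.drop i.toNat = '_' :: k.toList.drop (i.toNat + 1) := by
            have h2 : List.drop 1 (List.drop i.toNat k.toList) = tl := by rw [← htl]; rfl
            rw [List.drop_drop] at h2
            rw [h2, ← htl]
            rfl
          apply String.toList_inj.mp
          rw [pvKey, String.toList_append, String.toList_append]
          rw [← hname, hname_toList, ← hc.2.2.2, hsuf_toList]
          conv_lhs => rw [← List.take_append_drop i.toNat k.toList, hdrop]
          simp
      · rw [if_neg hc] at h; exact absurd h (by simp)
  · rw [if_neg (by simpa using hmem)] at h; exact absurd h (by simp)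

theorem pvParseToken_eq_some_iff (k : String) (m : String) (t : Int) (hm : m ∈ pvMats) :
    pvParseToken k = some (m, t) ↔ (t ∈ pvGrid ∧ k = pvKey m t) := by
  constructor
  · intro h
    rcases pvParseToken_sound k m t h with ⟨_, h2, h3⟩
    exact ⟨h2, h3⟩
  · rintro ⟨ht, rfl⟩
    exact pvParseToken_key m hm t ht

theorem pvParse_eq_some_iff (p : String × Int) (m : String) (t v : Int) :
    pvParse p = some (m, (t, v)) ↔ pvParseToken p.1 = some (m, t) ∧ p.2 = v := by
  rw [pvParse]
  cases hp : pvParseToken p.1 with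
  | none => simp
  | some nt =>
    obtain ⟨n1, n2⟩ := nt
    simp [Prod.ext_iff, and_assoc]

theorem pvFilterParse_eq_some_iff (m : String) (hm : m ∈ pvMats)
    (p : String × Int) (t₀ v₀ : Int) :
    ((Option.filter (fun q => q.1 == m) (pvParse p)).map (·.2) = some (t₀, v₀)) ↔
      (t₀ ∈ pvGrid ∧ p = (pvKey m t₀, v₀)) := by
  constructor
  · intro h
    cases hpp : pvParse p with
    | none => rw [hpp] at h; exact absurd h (by simp [Option.filter])
    | some q =>
      rw [hpp] at h
      by_cases hqm : q.1 == m
      · rw [Option.filter, if_pos hqm] at h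
        have hq2 : q.2 = (t₀, v₀) := by simpa using h
        have hq : q = (m, (t₀, v₀)) := by
          obtain ⟨q1, q2⟩ := q
          simp only [beq_iff_eq] at hqm
          simp only at hq2
          rw [hqm, hq2]
        rw [hq] at hpp
        obtain ⟨hpt, hp2⟩ := (pvParse_eq_some_iff p m t₀ v₀).mp hpp
        obtain ⟨hg, hkey⟩ := (pvParseToken_eq_some_iff p.1 m t₀ hm).mp hpt
        refine ⟨hg, ?_⟩
        obtain ⟨p1, p2⟩ := p
        simp only at hkey hp2
        rw [hkey, hp2]
      · rw [Option.filter, if_neg hqm] at h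
        exact absurd h (by simp)
  · rintro ⟨hg, rfl⟩
    have hpt : pvParseToken (pvKey m t₀) = some (m, t₀) := pvParseToken_key m hm t₀ hg
    have hpp : pvParse (pvKey m t₀, v₀) = some (m, (t₀, v₀)) :=
      (pvParse_eq_some_iff _ m t₀ v₀).mpr ⟨hpt, rfl⟩
    rw [hpp, Option.filter, if_pos (by simp)]
    rfl

theorem pvBucket_count (d : List (String × Int)) (m : String) (hm : m ∈ pvMats)
    (t₀ v₀ : Int) :
    (pvBucket d m).count (t₀, v₀) =
      if t₀ ∈ pvGrid then d.count (pvKey m t₀, v₀) else 0 := by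
  rw [pvBucket, List.filter_filterMap, List.map_filterMap, List.count_filterMap]
  by_cases hg : t₀ ∈ pvGrid
  · rw [if_pos hg]
    have hcg : ∀ p ∈ d,
        ((Option.filter (fun q => q.1 == m) (pvParse p)).map (·.2) == some (t₀, v₀)) =
          (p == (pvKey m t₀, v₀)) := by
      intro p _
      rw [Bool.eq_iff_iff]
      simp only [beq_iff_eq]
      rw [pvFilterParse_eq_some_iff m hm p t₀ v₀]
      simp [hg]
    rw [List.countP_congr (fun p hp => by rw [hcg p hp])]
    rfl
  · rw [if_neg hg]
    have hcg : ∀ p ∈ d,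
        ((Option.filter (fun q => q.1 == m) (pvParse p)).map (·.2) == some (t₀, v₀)) = false := by
      intro p _
      rw [Bool.eq_false_iff]
      intro hb
      exact hg ((pvFilterParse_eq_some_iff m hm p t₀ v₀).mp (by simpa using hb)).1
    rw [List.countP_congr (fun p hp => by rw [hcg p hp])]
    simp

theorem pvYs_count (d : List (String × Int)) (m : String) (t₀ v₀ : Int) :
    (pvYs d m).count (t₀, v₀) =
      if t₀ ∈ pvGrid ∧ (PySem.Dict.mk d).get? (pvKey m t₀) = some v₀ then 1 else 0 := by
  rw [pvYs, List.count_filterMap]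
  have hchar : ∀ s ∈ pvGrid,
      ((((PySem.Dict.mk d).get? (pvKey m s)).map (fun v => (s, v))) == some (t₀, v₀)) =
        ((s == t₀) && ((PySem.Dict.mk d).get? (pvKey m t₀) == some v₀)) := by
    intro s _
    rw [Bool.eq_iff_iff]
    by_cases hst : s = t₀
    · subst hst
      cases (PySem.Dict.mk d).get? (pvKey m s) with
      | none => simp
      | some v => simp [Prod.ext_iff]
    · cases (PySem.Dict.mk d).get? (pvKey m s) with
      | none => simp [hst]
      | some v => simp [Prod.ext_iff, hst]
  rw [List.countP_congr (fun s hs => by rw [hchar s hs])]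
  by_cases hv : (PySem.Dict.mk d).get? (pvKey m t₀) = some v₀
  · have h2 : ∀ s ∈ pvGrid, ((s == t₀) && ((PySem.Dict.mk d).get? (pvKey m t₀) == some v₀)) = (s == t₀) := by
      intro s _; simp [hv]
    rw [List.countP_congr (fun s hs => by rw [h2 s hs])]
    have hcnt : List.countP (fun s => s == t₀) pvGrid = pvGrid.count t₀ := rfl
    rw [hcnt]
    by_cases hg : t₀ ∈ pvGrid
    · rw [if_pos ⟨hg, hv⟩, List.count_eq_one_of_mem (by decide) hg]
    · rw [if_neg (fun hc => hg hc.1), List.count_eq_zero_of_not_mem hg]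
  · have h2 : ∀ s ∈ pvGrid, ((s == t₀) && ((PySem.Dict.mk d).get? (pvKey m t₀) == some v₀)) = false := by
      intro s _; simp [hv]
    rw [List.countP_congr (fun s hs => by rw [h2 s hs]), if_neg (fun hc => hv hc.2)]
    simp

theorem pv_count_of_nodup_keys (d : List (String × Int))
    (hnd : (d.map (·.1)).Nodup) (k : String) (v : Int) :
    d.count (k, v) = if (PySem.Dict.mk d).get? k = some v then 1 else 0 := by
  have hkeys : (PySem.Dict.mk d).keys.Nodup := hnd
  have hmemiff := PySem.Dict.get?_eq_some_iff_mem_items (PySem.Dict.mk d) k v hkeys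
  have hitems : (PySem.Dict.mk d).items = d := rfl
  rw [hitems] at hmemiff
  have hndd : d.Nodup := hnd.of_map
  by_cases hm : (k, v) ∈ d
  · rw [if_pos (hmemiff.mpr hm), List.count_eq_one_of_mem hndd hm]
  · rw [if_neg (fun hc => hm (hmemiff.mp hc)), List.count_eq_zero_of_not_mem hm]

theorem pvYs_perm_bucket (d : List (String × Int)) (m : String) (hm : m ∈ pvMats)
    (hnd : (d.map (·.1)).Nodup) : (pvYs d m).Perm (pvBucket d m) := by
  rw [List.perm_iff_count]
  intro c
  obtain ⟨t₀, v₀⟩ := c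
  rw [pvYs_count, pvBucket_count d m hm, pv_count_of_nodup_keys d hnd]
  by_cases hg : t₀ ∈ pvGrid <;> by_cases hv : (PySem.Dict.mk d).get? (pvKey m t₀) = some v₀ <;>
    simp [hg, hv]

theorem pvYs_pairwise (d : List (String × Int)) (m : String) :
    (pvYs d m).Pairwise (fun a b => a.1 < b.1) := by
  rw [pvYs, List.pairwise_filterMap]
  have hg : pvGrid.Pairwise (· < ·) := by decide
  refine hg.imp ?_
  intro a b hab x hx y hy
  cases hga : (PySem.Dict.mk d).get? (pvKey m a) with
  | none => rw [hga] at hx; exact absurd hx (by simp)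
  | some va =>
    cases hgb : (PySem.Dict.mk d).get? (pvKey m b) with
    | none => rw [hgb] at hy; exact absurd hy (by simp)
    | some vb =>
      rw [hga] at hx
      rw [hgb] at hy
      have hx2 : x = (a, va) := by simpa using hx.symm
      have hy2 : y = (b, vb) := by simpa using hy.symm
      rw [hx2, hy2]
      exact hab

theorem pv_sorted_bucket (d : List (String × Int)) (m : String) (hm : m ∈ pvMats)
    (hnd : (d.map (·.1)).Nodup) :
    PySem.List.sorted (pvBucket d m) (·.1) false = pvYs d m :=
  PySem.List.sorted_eq_of_perm_of_pairwise_lt _ _ _ (pvYs_perm_bucket d m hm hnd)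
    (pvYs_pairwise d m)

theorem pvAStep_foldl (d : List (String × Int)) (m : String) (l : List Int) (acc : List Int) :
    l.foldl (pvAStep d m) acc =
      acc ++ l.filterMap (fun t => (PySem.Dict.mk d).get? (m ++ "_" ++ PySem.Int.toStr t)) := by
  induction l generalizing acc with
  | nil => simp
  | cons t l ih =>
    rw [List.foldl_cons, List.filterMap_cons, ih]
    cases h : (PySem.Dict.mk d).get? (m ++ "_" ++ PySem.Int.toStr t) with
    | none => simp [pvAStep, h]
    | some x => simp [pvAStep, h]

-- A's inner loop is pvYs projected to ids
theorem pvA_inner (d : List (String × Int)) (m : String) :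
    pvGrid.foldl (pvAStep d m) [] = (pvYs d m).map (·.2) := by
  rw [pvAStep_foldl, List.nil_append, pvYs, List.map_filterMap]
  simp [Option.map_map, pvKey]

-- A's result, closed form
theorem pvA_items (d : List (String × Int)) :
    build_material_token_indices_py d =
      pvMats.map (fun m => (m, (pvYs d m).map (·.2))) := by
  rw [build_material_token_indices_py]
  rw [PySem.Dict.items_foldl_insert_fresh pvMats (fun a => a)
    (fun material => pvGrid.foldl (pvAStep d material) []) PySem.Dict.empty
    (fun a _ => rfl) (by simpa using (by decide : pvMats.Nodup))]
  rw [show (PySem.Dict.empty : PySem.Dict String (List Int)).items = [] from rfl, List.nil_append]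
  exact List.map_congr_left (fun m _ => by rw [pvA_inner d m])

-- B's result, closed form
-- Set.update adds nothing when every element is already present
theorem pvSet_update_of_subset (s : PySem.Set String) (xs : List String)
    (h : ∀ x ∈ xs, x ∈ s) : PySem.Set.update s xs = s := by
  induction xs generalizing s with
  | nil => rfl
  | cons y ys ih =>
    have hadd : PySem.Set.add s y = s := by
      simp [PySem.Set.add, PySem.Set.contains, h y (by simp)]
    simp only [PySem.Set.update, List.foldl_cons]
    rw [show List.foldl PySem.Set.add (PySem.Set.add s y) ys
        = PySem.Set.update (PySem.Set.add s y) ys from rfl, hadd]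
    exact ih s (fun x hx => h x (by simp [hx]))

theorem pvScan_eq (d : List (String × Int)) :
    pvScan d = (d.filterMap pvParse).foldl
      (fun bk q => bk.modify q.1 [] (· ++ [q.2])) pvBuckets0 := by
  rw [pvScan, List.foldl_filterMap]
  refine PySem.List.foldl_congr_mem _ _ _ _ ?_
  intro bk p _
  cases h : pvParseToken p.1 with
  | none => simp [pvParse, h]
  | some nt => simp [pvParse, h]

theorem pvScan_keys (d : List (String × Int)) : (pvScan d).keys = pvMats := by
  rw [pvScan_eq, PySem.Dict.keys_foldl_modify_key]
  rw [show pvBuckets0.keys = pvMats from by decide]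
  have hsub : ∀ x ∈ (d.filterMap pvParse).map (·.1), x ∈ pvMats := by
    intro x hx
    obtain ⟨q, hq, rfl⟩ := List.mem_map.mp hx
    obtain ⟨p, _, hp⟩ := List.mem_filterMap.mp hq
    obtain ⟨q1, q2, q3⟩ := q
    obtain ⟨hpt, _⟩ := (pvParse_eq_some_iff p q1 q2 q3).mp hp
    exact (pvParseToken_sound p.1 q1 q2 hpt).1
  exact pvSet_update_of_subset pvMats _ hsub

theorem pvB_items (d : List (String × Int)) :
    build_material_token_indices_py_alt d =
      pvMats.map (fun m => (m, (PySem.List.sorted (pvBucket d m) (·.1) false).map (·.2))) := by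
  have hkeys := pvScan_keys d
  have hns : (pvScan d).keys.Nodup := by rw [hkeys]; decide
  have hgetD : ∀ m ∈ pvMats, (pvScan d).getD m [] = pvBucket d m := by
    intro m hm
    rw [pvScan_eq, PySem.Dict.getD_foldl_modify_append]
    have h0 : ∀ m' ∈ pvMats, pvBuckets0.getD m' [] = [] := by decide
    rw [h0 m hm, List.nil_append, pvBucket]
  have hitems : (pvScan d).items = pvMats.map (fun m => (m, pvBucket d m)) := by
    rw [PySem.Dict.items_eq_map_keys _ hns ([] : List (Int × Int)), hkeys]
    exact List.map_congr_left (fun m hm => by rw [hgetD m hm])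
  rw [build_material_token_indices_py_alt]
  rw [PySem.Dict.items_foldl_insert_fresh ((pvScan d).items) (·.1)
    (fun mp => (PySem.List.sorted mp.2 (·.1) false).map (·.2)) PySem.Dict.empty
    (fun a _ => rfl)
    (by rw [show (pvScan d).items.map (·.1) = (pvScan d).keys from rfl, hkeys]; decide)]
  rw [show (PySem.Dict.empty : PySem.Dict String (List Int)).items = [] from rfl, List.nil_append]
  rw [hitems, List.map_map]
  rfl

-- ===== VERDICT (by name: the statement is the Claim_ definition above) =====
theorem build_material_token_indices_py_spec : Claim_equal_build_material_token_indices_py := by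
  intro d _ hpre
  unfold Spec_build_material_token_indices_py
  rw [pvA_items, pvB_items]
  refine List.map_congr_left (fun m hm => ?_)
  rw [pv_sorted_bucket d m hm hpre]
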